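-- pv_equiv track=rewrite | github.com/goaziz/leetcode | Easy/high_five_1086.py | highFive2
-- ===== SOURCE A (Python) =====
-- from collections import defaultdict
-- import heapq
-- from typing import List
--
-- def highFive2(items: List[List[int]]) -> List[List[int]]:
--     scores = defaultdict(list)
--     for _id, score in items:
--         heapq.heappush(scores[_id], score)
--         if len(scores[_id]) > 5:
--             heapq.heappop(scores[_id])
--     result = []
--     for _id, heap in scores.items():
--         result.append([_id, sum(heap) // 5])
--     return sorted(result)
-- ===== SOURCE B (Python) =====
-- from collections import defaultdict
-- from typing import List
--
-- def highFive2(items: List[List[int]]) -> List[List[int]]: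
--     scores = defaultdict(list)
--     for _id, score in items:
--         scores[_id].append(score)
--     return sorted([_id, sum(sorted(s, reverse=True)[:5]) // 5]
--                   for _id, s in scores.items())
-- ===== Notes on version B (the rewrite author's own statement) =====
-- stated objective: simpler
-- what changed: Replaces the incremental bounded min-heap (heappush + conditional heappop per item) by collecting all scores per id in one pass, then sorting each id's list descending and summing the first five.
import Mathlib
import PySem

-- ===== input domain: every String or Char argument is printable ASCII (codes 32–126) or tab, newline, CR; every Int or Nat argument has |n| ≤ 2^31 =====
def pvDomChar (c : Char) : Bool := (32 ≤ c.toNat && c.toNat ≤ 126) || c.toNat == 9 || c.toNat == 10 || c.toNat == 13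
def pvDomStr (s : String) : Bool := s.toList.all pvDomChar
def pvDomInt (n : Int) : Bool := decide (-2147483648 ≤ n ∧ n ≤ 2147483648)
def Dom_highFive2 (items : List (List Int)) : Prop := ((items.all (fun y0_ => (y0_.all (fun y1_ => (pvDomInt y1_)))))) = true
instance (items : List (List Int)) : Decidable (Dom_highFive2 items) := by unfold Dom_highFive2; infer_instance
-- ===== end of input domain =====

-- B replaces A's incremental bounded min-heap by collect-all, sort descending, take five —
-- same return value (objective: simpler); neither version mutates its argument.

-- ===== PORT A =====
-- heapq is ported by its contract: heappush adds the element to the heap's contents,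
-- heappop removes one occurrence of the minimum (A only ever reads the heap through
-- sum() and len(), which do not depend on heapq's internal array layout).
def pvHeapStep (h : List Int) (s : Int) : List Int :=
  let h' := h ++ [s]                                   -- heapq.heappush(scores[_id], score)
  if 5 < h'.length then                                -- if len(scores[_id]) > 5:
    match PySem.List.min? h' (fun x => x) with         --   heapq.heappop(scores[_id])
    | some m => h'.erase m
    | none => h'
  else h'

def pvStepA (d : PySem.Dict Int (List Int)) (it : List Int) : PySem.Dict Int (List Int) :=
  match it with                                        -- for _id, score in items (raises unless len == 2)
  | [i, s] => d.modify i [] (fun h => pvHeapStep h s)  -- defaultdict(list): missing key starts from []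
  | _ => d

-- sorted(result): result holds two-element lists [id, avg], so Python's lexicographic
-- list comparison is exactly the tuple key (l[0], l[1]) — ported with sorted2.
def highFive2 (items : List (List Int)) : List (List Int) :=
  let scores := items.foldl pvStepA PySem.Dict.empty
  let result := scores.items.foldl
    (fun r p => r ++ [[p.1, PySem.Int.floordiv p.2.sum 5]]) []
  PySem.List.sorted2 result (fun l => PySem.List.pyGetD l 0 0) (fun l => PySem.List.pyGetD l 1 0)

-- ===== PORT B =====
def pvStepB (d : PySem.Dict Int (List Int)) (it : List Int) : PySem.Dict Int (List Int) :=
  match it with                                        -- for _id, score in items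
  | [i, s] => d.modify i [] (fun l => l ++ [s])        -- scores[_id].append(score)
  | _ => d

def pvTop5Avg (s : List Int) : Int :=                  -- sum(sorted(s, reverse=True)[:5]) // 5
  PySem.Int.floordiv
    (PySem.List.slice (PySem.List.sorted s (fun x => x) true) none (some 5)).sum 5

def highFive2_alt (items : List (List Int)) : List (List Int) :=
  let scores := items.foldl pvStepB PySem.Dict.empty
  PySem.List.sorted2 (scores.items.map (fun p => [p.1, pvTop5Avg p.2]))
    (fun l => PySem.List.pyGetD l 0 0) (fun l => PySem.List.pyGetD l 1 0)

-- ===== PRECONDITION & SPEC =====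
-- Pre_ excludes exactly the inputs where 'for _id, score in items' raises (an inner
-- list whose length is not 2: ValueError on unpacking); A returns on all others.
def Pre_highFive2 (items : List (List Int)) : Prop := ∀ l ∈ items, l.length = 2
instance (items : List (List Int)) : Decidable (Pre_highFive2 items) := by unfold Pre_highFive2; infer_instance

def pvWitness_highFive2 : List (List Int) :=
  [[1, 91], [2, 93], [1, 92], [1, 60], [1, 100], [1, 50], [1, 80], [2, 100]]

def Spec_highFive2 (items : List (List Int)) (out : List (List Int)) : Prop := out = highFive2_alt items
instance (items : List (List Int)) (out : List (List Int)) : Decidable (Spec_highFive2 items out) := by unfold Spec_highFive2; infer_instance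

-- ===== CLAIM (what is proved, stated in full; the proofs are below) =====
def Claim_equal_highFive2 : Prop := ∀ (items : List (List Int)), Dom_highFive2 items → Pre_highFive2 items → Spec_highFive2 items (highFive2 items)

-- ===== LEMMAS AND PROOFS =====

-- sorted(·, reverse=True) with the identity key, as used by B
def pvSortDesc (xs : List Int) : List Int := PySem.List.sorted xs (fun x => x) true

-- a descending sort with the identity key depends only on the multiset of elements
lemma pvSortDesc_perm_congr {xs ys : List Int} (h : xs.Perm ys) : pvSortDesc xs = pvSortDesc ys := by
  apply PySem.List.eq_of_perm_of_pairwise_le_of_injective (key := fun x : Int => -x)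
  · exact fun a b hab => by simpa using hab
  · exact ((PySem.List.sorted_perm xs _ true).trans h).trans (PySem.List.sorted_perm ys _ true).symm
  · exact (PySem.List.sorted_pairwise_rev xs (fun x => x)).imp (by intro a b hab; simpa using hab)
  · exact (PySem.List.sorted_pairwise_rev ys (fun x => x)).imp (by intro a b hab; simpa using hab)

lemma pvSortDesc_append_singleton (l : List Int) (s : Int) :
    pvSortDesc (l ++ [s]) =
      PySem.List.insertBy (fun a b : Int => decide (b < a)) s (pvSortDesc l) := by
  unfold pvSortDesc
  rw [PySem.List.sorted_rev_eq_foldl_insertBy, PySem.List.sorted_rev_eq_foldl_insertBy,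
    List.foldl_append]
  rfl

lemma pv_length_insertBy {α : Type} (p : α → α → Bool) (x : α) (ys : List α) :
    (PySem.List.insertBy p x ys).length = ys.length + 1 := by
  induction ys with
  | nil => rfl
  | cons y t ih => simp only [PySem.List.insertBy]; split <;> simp [ih]

lemma pv_take_insertBy_take {α : Type} (p : α → α → Bool) (x : α) :
    ∀ (n : Nat) (ys : List α),
      (PySem.List.insertBy p x (ys.take n)).take n = (PySem.List.insertBy p x ys).take n := by
  intro n ys
  induction ys generalizing n with
  | nil => simp
  | cons y t ih =>
    cases n with
    | zero => simp
    | succ m =>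
      simp only [List.take_succ_cons, PySem.List.insertBy]
      split
      · cases m <;> simp [List.take_take]
      · simp [ih m]

-- the last element of a descending chain is a lower bound
lemma pv_getLast_le_of_pairwise :
    ∀ (z : List Int), z.Pairwise (fun a b => b ≤ a) → ∀ (hne : z ≠ []) (y : Int), y ∈ z → z.getLast hne ≤ y := by
  intro z hp
  induction z with
  | nil => intro hne; exact absurd rfl hne
  | cons a t ih =>
    intro hne y hy
    rcases List.pairwise_cons.mp hp with ⟨ha, ht⟩
    cases t with
    | nil =>
      simp only [List.mem_singleton] at hy
      subst hy
      simp
    | cons b u =>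
      have hlast : (a :: b :: u).getLast hne = (b :: u).getLast (by simp) := by
        simp [List.getLast_cons]
      rw [hlast]
      rcases List.mem_cons.mp hy with rfl | hy
      · exact le_trans (ih ht (by simp) b (by simp)) (ha b (by simp))
      · exact ih ht (by simp) y hy

-- removing a minimum from a list sorts to the descending sort without its last element
lemma pvSortDesc_erase_min (l : List Int) (m : Int)
    (hm : PySem.List.min? l (fun x => x) = some m) :
    pvSortDesc (l.erase m) = (pvSortDesc l).dropLast := by
  have hmem : m ∈ l := PySem.List.min?_mem hm
  have hmin : ∀ y ∈ l, m ≤ y := PySem.List.min?_isMin hm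
  set z := pvSortDesc l with hz
  have hperm : z.Perm l := PySem.List.sorted_perm l _ true
  have hpw : z.Pairwise (fun a b => b ≤ a) := PySem.List.sorted_pairwise_rev l (fun x => x)
  have hzne : z ≠ [] := by
    intro h; rw [h] at hperm; exact absurd (hperm.symm.mem_iff.mp hmem) (by simp)
  have hlast_mem : z.getLast hzne ∈ l := hperm.mem_iff.mp (List.getLast_mem hzne)
  have hlast : z.getLast hzne = m := by
    have h1 : m ≤ z.getLast hzne := hmin _ hlast_mem
    have h2 : z.getLast hzne ≤ m :=
      pv_getLast_le_of_pairwise z hpw hzne m (hperm.symm.mem_iff.mp hmem)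
    exact le_antisymm h2 h1
  have hsplit : z.dropLast ++ [m] = z := by rw [← hlast]; exact List.dropLast_append_getLast hzne
  have hz_perm : z.Perm (m :: z.dropLast) := by
    conv_lhs => rw [← hsplit]
    exact List.perm_append_singleton m z.dropLast
  have herase : (l.erase m).Perm z.dropLast := by
    have h1 : (l.erase m).Perm (z.erase m) := List.Perm.erase m hperm.symm
    have h2 : (z.erase m).Perm ((m :: z.dropLast).erase m) := List.Perm.erase m hz_perm
    simpa [List.erase_cons_head] using h1.trans h2
  rw [pvSortDesc_perm_congr herase]
  exact PySem.List.sorted_rev_eq_self_of_pairwise _ _ (hpw.sublist (List.dropLast_sublist z))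

-- THE CORE FACT: A's bounded-heap fold holds, as a multiset, exactly the five
-- largest scores — its descending sort is the first five of the full descending sort.
lemma pvHeapFold_sortDesc : ∀ (xs : List Int),
    pvSortDesc (xs.foldl pvHeapStep []) = (pvSortDesc xs).take 5 := by
  intro xs
  induction xs using List.reverseRecOn with
  | nil => rfl
  | append_singleton l s ih =>
    rw [List.foldl_append]
    simp only [List.foldl_cons, List.foldl_nil]
    set h := l.foldl pvHeapStep [] with hh
    have hlen : h.length = min 5 (pvSortDesc l).length := by
      have := congrArg List.length ih
      simpa [pvSortDesc, PySem.List.length_sorted] using this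
    rw [pvSortDesc_append_singleton l s]
    unfold pvHeapStep
    by_cases hbig : 5 < (h ++ [s]).length
    · -- heap already has five elements: push then pop the minimum
      have hne : h ++ [s] ≠ [] := by simp
      obtain ⟨m, hm⟩ : ∃ m, PySem.List.min? (h ++ [s]) (fun x : Int => x) = some m := by
        rcases Option.eq_none_or_eq_some (PySem.List.min? (h ++ [s]) (fun x : Int => x)) with h0 | hs
        · exact absurd ((PySem.List.min?_eq_none_iff _ _).mp h0) hne
        · exact hs
      simp only [hbig, if_true, hm]
      rw [pvSortDesc_erase_min _ _ hm, List.dropLast_eq_take]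
      have hzl : (pvSortDesc (h ++ [s])).length = 6 := by
        have : h.length = 5 := by simp at hbig; omega
        simp [pvSortDesc, PySem.List.length_sorted, this]
      rw [hzl]
      rw [pvSortDesc_append_singleton h s, ih]
      norm_num
      exact pv_take_insertBy_take _ s 5 (pvSortDesc l)
    · -- fewer than five scores so far: just push
      simp only [hbig, if_false]
      have hlt : (pvSortDesc l).length ≤ 4 := by
        simp only [List.length_append, List.length_cons, List.length_nil, not_lt] at hbig
        omega
      have h1 : (pvSortDesc l).take 5 = pvSortDesc l := List.take_of_length_le (by omega)
      have h2 : (PySem.List.insertBy (fun a b : Int => decide (b < a)) s (pvSortDesc l)).take 5 =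
          PySem.List.insertBy (fun a b : Int => decide (b < a)) s (pvSortDesc l) :=
        List.take_of_length_le (by rw [pv_length_insertBy]; omega)
      rw [pvSortDesc_append_singleton h s, ih, h1, h2]

-- the two grouping folds build dicts with identical keys; A's value at each key is
-- the bounded-heap fold of B's (plainly appended) value
lemma pv_dict_inv : ∀ (items : List (List Int)) (dA dB : PySem.Dict Int (List Int)),
    (∀ l ∈ items, l.length = 2) →
    dA.keys = dB.keys → dB.keys.Nodup →
    (∀ k, dA.getD k [] = (dB.getD k []).foldl pvHeapStep []) →
    (items.foldl pvStepA dA).keys = (items.foldl pvStepB dB).keys ∧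
    (items.foldl pvStepB dB).keys.Nodup ∧
    (∀ k, (items.foldl pvStepA dA).getD k [] =
          ((items.foldl pvStepB dB).getD k []).foldl pvHeapStep []) := by
  intro items
  induction items with
  | nil => intro dA dB _ hk hnd hv; exact ⟨hk, hnd, hv⟩
  | cons it rest ih =>
    intro dA dB h2 hk hnd hv
    obtain ⟨i, s, rfl⟩ := List.length_eq_two.mp (h2 it (by simp))
    simp only [List.foldl_cons, pvStepA, pvStepB]
    apply ih _ _ (fun l hl => h2 l (by simp [hl]))
    · -- keys stay equal
      rw [PySem.Dict.keys_modify, PySem.Dict.keys_modify]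
      by_cases hc : dB.contains i = true
      · have hcA : dA.contains i = true := by
          rw [PySem.Dict.contains_iff_mem_keys, hk, ← PySem.Dict.contains_iff_mem_keys]; exact hc
        rw [PySem.Dict.keys_insert_of_contains _ _ hcA, PySem.Dict.keys_insert_of_contains _ _ hc, hk]
      · have hcB : dB.contains i = false := by simpa using hc
        have hcA : dA.contains i = false := by
          by_contra h
          have : dA.contains i = true := by simpa using h
          rw [PySem.Dict.contains_iff_mem_keys, hk, ← PySem.Dict.contains_iff_mem_keys] at this
          simp [this] at hcB
        rw [PySem.Dict.keys_insert_of_not_contains _ _ hcA, PySem.Dict.keys_insert_of_not_contains _ _ hcB, hk]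
    · -- keys stay Nodup
      rw [PySem.Dict.keys_modify]
      exact PySem.Dict.nodup_keys_insert _ _ _ hnd
    · -- value relation is preserved by one step
      intro k
      rw [PySem.Dict.getD_modify, PySem.Dict.getD_modify]
      by_cases hki : k = i
      · simp only [hki, if_true, hv i]
        rw [List.foldl_append]
        rfl
      · simp only [hki, if_false, hv k]

-- ===== VERDICT (by name: the statement is the Claim_ definition above) =====
theorem highFive2_spec : Claim_equal_highFive2 := by
  intro items _ hpre
  unfold Spec_highFive2 highFive2 highFive2_alt
  dsimp only
  obtain ⟨hk, hnd, hv⟩ :=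
    pv_dict_inv items PySem.Dict.empty PySem.Dict.empty hpre
      rfl PySem.Dict.nodup_keys_empty
      (fun k => rfl)
  set dA := items.foldl pvStepA PySem.Dict.empty
  set dB := items.foldl pvStepB PySem.Dict.empty
  have hndA : dA.keys.Nodup := hk ▸ hnd
  rw [PySem.List.foldl_append_singleton_eq_map (fun p : Int × List Int => [p.1, PySem.Int.floordiv p.2.sum 5])]
  rw [PySem.Dict.items_eq_map_keys dA hndA [], PySem.Dict.items_eq_map_keys dB hnd []]
  simp only [List.nil_append, List.map_map, hk]
  congr 1
  apply List.map_congr_left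
  intro k _
  simp only [Function.comp]
  congr 2
  rw [hv k]
  unfold pvTop5Avg
  congr 1
  rw [PySem.List.slice_to _ (by norm_num)]
  have hs : pvSortDesc ((dB.getD k []).foldl pvHeapStep []) = (pvSortDesc (dB.getD k [])).take 5 :=
    pvHeapFold_sortDesc (dB.getD k [])
  calc ((dB.getD k []).foldl pvHeapStep []).sum
      = (pvSortDesc ((dB.getD k []).foldl pvHeapStep [])).sum :=
        (List.Perm.sum_eq (PySem.List.sorted_perm _ _ true)).symm
    _ = ((pvSortDesc (dB.getD k [])).take 5).sum := by rw [hs]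
    _ = ((PySem.List.sorted (dB.getD k []) (fun x => x) true).take (5:Int).toNat).sum := rfl
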